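-- pv_equiv track=rewrite | github.com/AvidCoder08/goofyhailmary | gpa_calculator.py | marks_to_grade_point
-- ===== SOURCE A (Python) =====
-- GRADE_SCALE = {
--     90: 10,    # S
--     80: 9,     # A
--     70: 8,     # B
--     60: 7,     # C
--     50: 6,     # D
--     0: 5       # E
-- }
--
-- def marks_to_grade_point(marks):
--     """Convert marks percentage to grade point (0-10).
--
--     Args:
--         marks: Marks percentage (0-100)
--
--     Returns:
--         Grade point (0-10)
--     """
--     try:
--         marks = float(marks)
--     except (ValueError, TypeError):
--         return None
--
--     # Find the appropriate grade point
--     for threshold in sorted(GRADE_SCALE.keys(), reverse=True):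
--         if marks >= threshold:
--             return GRADE_SCALE[threshold]
--
--     return 0
-- ===== SOURCE B (Python) =====
-- def marks_to_grade_point(marks):
--     """Convert marks percentage to grade point via a closed formula."""
--     try:
--         marks = float(marks)
--     except (ValueError, TypeError):
--         return None
--     if marks >= 90:
--         return 10
--     if marks >= 50:
--         return int(marks // 10) + 1
--     if marks >= 0:
--         return 5
--     return 0
-- ===== Notes on version B (the rewrite author's own statement) =====
-- stated objective: simpler
-- what changed: Replaces the sorted-threshold-table scan and dict lookups with a closed-form comparison: 10 above 90, marks//10+1 for 50..89, 5 for 0..49, else 0.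
import Mathlib
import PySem

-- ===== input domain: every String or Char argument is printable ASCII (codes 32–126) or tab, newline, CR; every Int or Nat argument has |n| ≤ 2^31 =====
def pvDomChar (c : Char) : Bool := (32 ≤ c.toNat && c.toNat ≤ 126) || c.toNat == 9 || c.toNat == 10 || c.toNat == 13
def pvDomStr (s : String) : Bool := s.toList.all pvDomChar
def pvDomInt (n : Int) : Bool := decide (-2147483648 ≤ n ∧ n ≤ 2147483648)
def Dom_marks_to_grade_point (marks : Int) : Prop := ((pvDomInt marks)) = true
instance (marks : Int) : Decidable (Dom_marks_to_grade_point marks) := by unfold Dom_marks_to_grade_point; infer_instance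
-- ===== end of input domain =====

-- B replaces A's sorted-threshold scan with a closed-form comparison chain (objective: simpler).
-- float(marks) on an int argument is exact and never raises; it is ported as the identity.

-- ===== PORT A =====
def GRADE_SCALE : PySem.Dict Int Int :=
  PySem.Dict.ofList [(90, 10), (80, 9), (70, 8), (60, 7), (50, 6), (0, 5)]

-- the for-loop over sorted(GRADE_SCALE.keys(), reverse=True); GRADE_SCALE[threshold]
-- is ported with getD 0 (every looked-up key is present, so the default is never used)
def pvFindGrade (marks : Int) : List Int → Option Int
  | [] => some 0
  | t :: ts => if marks ≥ t then some (PySem.Dict.getD GRADE_SCALE t 0) else pvFindGrade marks ts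

def marks_to_grade_point (marks : Int) : Option Int :=
  pvFindGrade marks (PySem.List.sorted (PySem.Dict.keys GRADE_SCALE) id true)

-- ===== PORT B =====
def marks_to_grade_point_alt (marks : Int) : Option Int :=
  if marks ≥ 90 then some 10
  else if marks ≥ 50 then some (PySem.Int.floordiv marks 10 + 1)
  else if marks ≥ 0 then some 5
  else some 0

-- ===== PRECONDITION & SPEC =====
def Spec_marks_to_grade_point (marks : Int) (out : Option Int) : Prop := out = marks_to_grade_point_alt marks
instance (marks : Int) (out : Option Int) : Decidable (Spec_marks_to_grade_point marks out) := by unfold Spec_marks_to_grade_point; infer_instance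

-- ===== CLAIM (what is proved, stated in full; the proofs are below) =====
def Claim_equal_marks_to_grade_point : Prop := ∀ (marks : Int), Dom_marks_to_grade_point marks → Spec_marks_to_grade_point marks (marks_to_grade_point marks)

-- ===== LEMMAS AND PROOFS =====
theorem pvFloordiv10 (m q : Int) (h1 : 10 * q ≤ m) (h2 : m < 10 * (q + 1)) :
    PySem.Int.floordiv m 10 = q := by
  rw [PySem.Int.floordiv_eq_iff_of_pos (by norm_num)]
  omega

-- ===== VERDICT (by name: the statement is the Claim_ definition above) =====
theorem marks_to_grade_point_spec : Claim_equal_marks_to_grade_point := by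
  intro m _
  show marks_to_grade_point m = marks_to_grade_point_alt m
  have hsort : PySem.List.sorted (PySem.Dict.keys GRADE_SCALE) id true = [90, 80, 70, 60, 50, 0] := by decide
  simp only [marks_to_grade_point, hsort, pvFindGrade, marks_to_grade_point_alt]
  split_ifs with h1 h2 h3 h4 h5 h6 h7 h8 h9 <;>
    first
      | decide
      | omega
      | (congr 1; rw [pvFloordiv10 m 8 (by omega) (by omega)]; decide)
      | (congr 1; rw [pvFloordiv10 m 7 (by omega) (by omega)]; decide)
      | (congr 1; rw [pvFloordiv10 m 6 (by omega) (by omega)]; decide)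
      | (congr 1; rw [pvFloordiv10 m 5 (by omega) (by omega)]; decide)
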